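-- pv_equiv track=rewrite | github.com/skilledwolf/quantumhall_matrixelements | src/quantumhall_matrixelements/symmetric/onebody.py | _build_canonical_select
-- ===== SOURCE A (Python) =====
-- OneBodyQuad = tuple[int, int, int, int]
--
-- def _build_canonical_select(nmax: int, mmax: int) -> list[OneBodyQuad]:
--     blocks: dict[int, list[tuple[int, int]]] = {}
--     for n in range(int(nmax)):
--         for m in range(int(mmax)):
--             blocks.setdefault(m - n, []).append((n, m))
--
--     select_list: list[OneBodyQuad] = []
--     for ell in sorted(blocks):
--         states = blocks[ell]
--         for i, (n_row, m_row) in enumerate(states):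
--             for n_col, m_col in states[i:]:
--                 select_list.append((n_row, m_row, n_col, m_col))
--     return select_list
-- ===== SOURCE B (Python) =====
-- def _build_canonical_select(nmax: int, mmax: int) -> list[tuple[int, int, int, int]]:
--     nmax = int(nmax)
--     mmax = int(mmax)
--     select_list: list[tuple[int, int, int, int]] = []
--     for ell in range(1 - nmax, mmax):
--         ns = range(max(0, -ell), min(nmax, mmax - ell))
--         for i, n_row in enumerate(ns):
--             for n_col in ns[i:]:
--                 select_list.append((n_row, n_row + ell, n_col, n_col + ell))
--     return select_list
-- ===== Notes on version B (the rewrite author's own statement) =====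
-- stated objective: simpler
-- what changed: B replaces A's dict-grouping of all (n,m) cells by diagonal plus a sort of the keys with a single pass over the diagonals ell = 1-nmax .. mmax-1 in increasing order, computing each diagonal's contiguous row range range(max(0,-ell), min(nmax, mmax-ell)) in closed form.
import Mathlib
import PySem

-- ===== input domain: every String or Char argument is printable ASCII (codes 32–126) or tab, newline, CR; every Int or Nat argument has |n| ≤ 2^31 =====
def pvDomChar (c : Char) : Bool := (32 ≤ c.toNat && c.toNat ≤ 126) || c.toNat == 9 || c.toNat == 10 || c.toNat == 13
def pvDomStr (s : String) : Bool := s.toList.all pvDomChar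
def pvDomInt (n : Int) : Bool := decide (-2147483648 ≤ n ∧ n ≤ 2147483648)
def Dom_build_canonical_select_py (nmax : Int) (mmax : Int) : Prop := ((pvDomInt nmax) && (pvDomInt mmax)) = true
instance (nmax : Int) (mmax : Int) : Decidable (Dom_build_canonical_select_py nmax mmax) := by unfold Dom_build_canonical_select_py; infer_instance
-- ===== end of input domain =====

-- B replaces A's dict-grouping-plus-sort by direct arithmetic: it enumerates the diagonals
-- ell = m - n in increasing order and computes each diagonal's contiguous row range in closed
-- form, eliminating the dictionary and the sort (objective: simpler).

-- ===== PORT A =====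
def build_canonical_select_py (nmax : Int) (mmax : Int) : List (Int × Int × Int × Int) :=
  let blocks : PySem.Dict Int (List (Int × Int)) :=
    (PySem.List.pyRange 0 nmax 1).foldl (fun blocks n =>
      (PySem.List.pyRange 0 mmax 1).foldl (fun blocks m =>
        blocks.modify (m - n) [] (fun v => v ++ [(n, m)])) blocks) PySem.Dict.empty
  (PySem.List.sorted blocks.keys (fun x => x)).foldl (fun select_list ell =>
    let states := blocks.getD ell []
    (PySem.List.enumerate states 0).foldl (fun select_list p =>
      (PySem.List.slice states (some p.1) none).foldl (fun select_list q =>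
        select_list ++ [(p.2.1, p.2.2, q.1, q.2)]) select_list) select_list) []

-- ===== PORT B =====
def build_canonical_select_py_alt (nmax : Int) (mmax : Int) : List (Int × Int × Int × Int) :=
  (PySem.List.pyRange (1 - nmax) mmax 1).foldl (fun select_list ell =>
    let ns : List Int := PySem.List.pyRange (max 0 (-ell)) (min nmax (mmax - ell)) 1
    (PySem.List.enumerate ns 0).foldl (fun select_list p =>
      (PySem.List.slice ns (some p.1) none).foldl (fun select_list n_col =>
        select_list ++ [(p.2, p.2 + ell, n_col, n_col + ell)]) select_list) select_list) []

-- ===== PRECONDITION & SPEC =====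
def Spec_build_canonical_select_py (nmax : Int) (mmax : Int) (out : List (Int × Int × Int × Int)) : Prop := out = build_canonical_select_py_alt nmax mmax
instance (nmax : Int) (mmax : Int) (out : List (Int × Int × Int × Int)) : Decidable (Spec_build_canonical_select_py nmax mmax out) := by unfold Spec_build_canonical_select_py; infer_instance

-- ===== CLAIM (what is proved, stated in full; the proofs are below) =====
def Claim_equal_build_canonical_select_py : Prop := ∀ (nmax : Int) (mmax : Int), Dom_build_canonical_select_py nmax mmax → Spec_build_canonical_select_py nmax mmax (build_canonical_select_py nmax mmax)

-- ===== LEMMAS AND PROOFS =====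

-- the (key, value) stream A feeds into the dict, flattened
def pvPairs (nmax mmax : Int) : List (Int × (Int × Int)) :=
  (PySem.List.pyRange 0 nmax 1).flatMap (fun n =>
    (PySem.List.pyRange 0 mmax 1).map (fun m => (m - n, (n, m))))

def pvBlocks (nmax mmax : Int) : PySem.Dict Int (List (Int × Int)) :=
  (pvPairs nmax mmax).foldl (fun d p => d.modify p.1 [] (fun v => v ++ [p.2])) PySem.Dict.empty

-- A's per-diagonal emission (upper-triangular pairs of states)
def pvEmitA (states : List (Int × Int)) : List (Int × Int × Int × Int) :=
  (PySem.List.enumerate states 0).flatMap (fun p =>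
    (PySem.List.slice states (some p.1) none).map (fun q => (p.2.1, p.2.2, q.1, q.2)))

-- B's per-diagonal row range and emission
def pvNs (nmax mmax ell : Int) : List Int :=
  PySem.List.pyRange (max 0 (-ell)) (min nmax (mmax - ell)) 1

def pvEmitB (ell : Int) (ns : List Int) : List (Int × Int × Int × Int) :=
  (PySem.List.enumerate ns 0).flatMap (fun p =>
    (PySem.List.slice ns (some p.1) none).map (fun q => (p.2, p.2 + ell, q, q + ell)))

lemma pvA_eq (nmax mmax : Int) :
    build_canonical_select_py nmax mmax =
      (PySem.List.sorted (pvBlocks nmax mmax).keys (fun x => x)).flatMap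
        (fun ell => pvEmitA ((pvBlocks nmax mmax).getD ell [])) := by
  have hb : (PySem.List.pyRange 0 nmax 1).foldl (fun blocks n =>
      (PySem.List.pyRange 0 mmax 1).foldl (fun blocks m =>
        blocks.modify (m - n) [] (fun v => v ++ [(n, m)])) blocks) PySem.Dict.empty
      = pvBlocks nmax mmax := by
    rw [pvBlocks, pvPairs, List.foldl_flatMap]
    simp only [List.foldl_map]
  simp only [build_canonical_select_py, hb, pvEmitA,
    PySem.List.foldl_append_singleton_eq_map, PySem.List.foldl_append_eq_flatMap,
    List.nil_append]

lemma pvB_eq (nmax mmax : Int) :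
    build_canonical_select_py_alt nmax mmax =
      (PySem.List.pyRange (1 - nmax) mmax 1).flatMap
        (fun ell => pvEmitB ell (pvNs nmax mmax ell)) := by
  simp only [build_canonical_select_py_alt, pvEmitB, pvNs,
    PySem.List.foldl_append_singleton_eq_map, PySem.List.foldl_append_eq_flatMap,
    List.nil_append]

lemma pvEnumerate_map {α β : Type} (f : α → β) (xs : List α) (s : Int) :
    PySem.List.enumerate (xs.map f) s = (PySem.List.enumerate xs s).map (fun p => (p.1, f p.2)) := by
  induction xs generalizing s with
  | nil => simp [PySem.List.enumerate_nil]
  | cons x t ih => simp [PySem.List.enumerate_cons, ih]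

lemma pvEmitA_map (ell : Int) (ns : List Int) :
    pvEmitA (ns.map (fun n => (n, n + ell))) = pvEmitB ell ns := by
  simp only [pvEmitA, pvEmitB, pvEnumerate_map, List.flatMap_map,
    PySem.List.slice_some_none, List.length_map, ← List.map_drop, List.map_map]
  rfl

-- filter of an equality test over a contiguous range
lemma pvFilter_eq_pyRange (a b v : Int) :
    (PySem.List.pyRange a b 1).filter (fun x => x == v) =
      if a ≤ v ∧ v < b then [v] else [] := by
  rw [List.filter_beq]
  by_cases h : a ≤ v ∧ v < b
  · rw [List.count_eq_one_of_mem (PySem.List.nodup_pyRange_one a b)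
      ((PySem.List.mem_pyRange_one).2 h)]
    simp [h]
  · rw [List.count_eq_zero_of_not_mem (fun hm => h ((PySem.List.mem_pyRange_one).1 hm))]
    simp [h]

lemma pvFlatMap_ite_singleton {α β : Type} (l : List α) (p : α → Prop) [DecidablePred p] (f : α → β) :
    l.flatMap (fun x => if p x then [f x] else []) =
      (l.filter (fun x => decide (p x))).map f := by
  induction l with
  | nil => rfl
  | cons x t ih =>
    by_cases h : p x <;> simp [List.flatMap_cons, h, ih]

-- filter of an interval condition over a contiguous range is a contiguous range
lemma pvFilter_pyRange (a b c d : Int) :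
    (PySem.List.pyRange a b 1).filter (fun x => decide (c ≤ x ∧ x < d)) =
      PySem.List.pyRange (max a c) (min b d) 1 := by
  by_cases hab : b ≤ a
  · rw [PySem.List.pyRange_one_eq_nil hab, PySem.List.pyRange_one_eq_nil (by omega)]
    rfl
  · rw [not_le] at hab
    rw [PySem.List.pyRange_one_cons hab]
    have ih := pvFilter_pyRange (a + 1) b c d
    by_cases h : c ≤ a ∧ a < d
    · simp only [List.filter_cons, decide_eq_true_eq, if_pos h, ih]
      have h1 : max a c = a := by omega
      have h2 : max (a + 1) c = a + 1 := by omega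
      have h3 : a < min b d := by omega
      rw [h1, h2, PySem.List.pyRange_one_cons h3]
    · simp only [List.filter_cons, decide_eq_true_eq, if_neg h, ih]
      by_cases hc : a < c
      · congr 1; omega
      · rw [PySem.List.pyRange_one_eq_nil (by omega), PySem.List.pyRange_one_eq_nil (by omega)]
termination_by (b - a).toNat
decreasing_by omega

lemma pvGetD_blocks (nmax mmax ell : Int) :
    (pvBlocks nmax mmax).getD ell [] = (pvNs nmax mmax ell).map (fun n => (n, n + ell)) := by
  rw [pvBlocks, PySem.Dict.getD_foldl_modify_append, PySem.Dict.getD_empty, List.nil_append,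
    pvPairs, List.filter_flatMap, List.map_flatMap]
  have hstep : ∀ n : Int,
      (((PySem.List.pyRange 0 mmax 1).map (fun m => (m - n, (n, m)))).filter
          (fun p => p.1 == ell)).map (fun p => p.2) =
        if 0 ≤ n + ell ∧ n + ell < mmax then [(n, n + ell)] else [] := by
    intro n
    rw [List.filter_map]
    have hcong : ((PySem.List.pyRange 0 mmax 1).filter
        (((fun p : Int × (Int × Int) => p.1 == ell)) ∘ (fun m => (m - n, (n, m))))) =
        (PySem.List.pyRange 0 mmax 1).filter (fun m => m == n + ell) := by
      apply List.filter_congr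
      intro m _
      simp only [Function.comp_apply]
      by_cases h : m = n + ell
      · simp [h]
      · have h2 : ¬ (m - n = ell) := by omega
        simp [h, h2]
    rw [hcong, pvFilter_eq_pyRange]
    by_cases h : 0 ≤ n + ell ∧ n + ell < mmax
    · rw [if_pos h, if_pos h]
      simp
    · rw [if_neg h, if_neg h]
      rfl
  calc (PySem.List.pyRange 0 nmax 1).flatMap (fun n =>
          (((PySem.List.pyRange 0 mmax 1).map (fun m => (m - n, (n, m)))).filter
            (fun p => p.1 == ell)).map (fun p => p.2))
      = (PySem.List.pyRange 0 nmax 1).flatMap (fun n =>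
          if 0 ≤ n + ell ∧ n + ell < mmax then [(n, n + ell)] else []) := by
        exact List.flatMap_congr (fun n _ => hstep n)
    _ = ((PySem.List.pyRange 0 nmax 1).filter
          (fun n => decide (0 ≤ n + ell ∧ n + ell < mmax))).map (fun n => (n, n + ell)) :=
        pvFlatMap_ite_singleton _ _ _
    _ = (pvNs nmax mmax ell).map (fun n => (n, n + ell)) := by
        have : ((PySem.List.pyRange 0 nmax 1).filter
            (fun n => decide (0 ≤ n + ell ∧ n + ell < mmax))) =
            ((PySem.List.pyRange 0 nmax 1).filter
            (fun n => decide (-ell ≤ n ∧ n < mmax - ell))) := by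
          apply List.filter_congr
          intro n _
          apply decide_eq_decide.2
          omega
        rw [this, pvFilter_pyRange, pvNs]

lemma pvKeys_blocks (nmax mmax : Int) :
    (pvBlocks nmax mmax).keys = PySem.Set.ofList ((pvPairs nmax mmax).map (fun p => p.1)) := by
  rw [pvBlocks, PySem.Dict.keys_foldl_modify_key (pvPairs nmax mmax) (fun p => p.1) []
    (fun _ p v => v ++ [p.2]) PySem.Dict.empty]
  rw [PySem.Dict.keys_empty, PySem.Set.ofList_eq_foldl]
  rfl

lemma pvSorted_keys_pos (nmax mmax : Int) (hn : 0 < nmax) (hm : 0 < mmax) :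
    PySem.List.sorted (pvBlocks nmax mmax).keys (fun x => x) =
      PySem.List.pyRange (1 - nmax) mmax 1 := by
  apply PySem.List.sorted_eq_of_perm_of_pairwise_lt
  · rw [pvKeys_blocks]
    apply (List.perm_ext_iff_of_nodup (PySem.List.nodup_pyRange_one _ _)
      (PySem.Set.nodup_ofList _)).2
    intro x
    rw [PySem.Set.mem_ofList, PySem.List.mem_pyRange_one]
    simp only [pvPairs, List.map_flatMap, List.mem_flatMap, List.mem_map, Function.comp,
      List.map_map, PySem.List.mem_pyRange_one]
    constructor
    · intro hx
      refine ⟨max 0 (-x), ⟨by omega, by omega⟩, max 0 (-x) + x, ⟨by omega, by omega⟩, by ring⟩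
    · rintro ⟨n, ⟨hn0, hn1⟩, m, ⟨hm0, hm1⟩, rfl⟩
      omega
  · exact PySem.List.pairwise_lt_pyRange_one _ _

lemma pvSorted_keys_degenerate (nmax mmax : Int) (h : nmax ≤ 0 ∨ mmax ≤ 0) :
    PySem.List.sorted (pvBlocks nmax mmax).keys (fun x => x) = [] := by
  have hp : pvPairs nmax mmax = [] := by
    rcases h with h | h
    · rw [pvPairs, PySem.List.pyRange_one_eq_nil h]
      rfl
    · rw [pvPairs, List.flatMap_eq_nil_iff]
      intro n _
      rw [PySem.List.pyRange_one_eq_nil h]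
      rfl
  rw [pvKeys_blocks, hp]
  rfl

-- ===== VERDICT (by name: the statement is the Claim_ definition above) =====
theorem build_canonical_select_py_spec : Claim_equal_build_canonical_select_py := by
  intro nmax mmax _
  unfold Spec_build_canonical_select_py
  rw [pvA_eq, pvB_eq]
  by_cases hpos : 0 < nmax ∧ 0 < mmax
  · rw [pvSorted_keys_pos nmax mmax hpos.1 hpos.2]
    simp only [pvGetD_blocks, pvEmitA_map]
  · rw [pvSorted_keys_degenerate nmax mmax (by omega), List.flatMap_nil]
    symm
    rw [List.flatMap_eq_nil_iff]
    intro ell hell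
    rw [PySem.List.mem_pyRange_one] at hell
    have hns : pvNs nmax mmax ell = [] := by
      rw [pvNs, PySem.List.pyRange_one_eq_nil (by omega)]
    rw [hns]
    rfl
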